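-- pv_equiv track=rewrite | github.com/hasimsait/GossipProblem-PDDL-generator | writer/problem_file.py | numToAgnum
-- ===== SOURCE A (Python) =====
-- def numToAgnum(myString):
--     digits=['0','1','2','3','4','5','6','7','8','9']
--     resStr=''
--     for i in range(1,len(myString)-1):
--         if myString[i-1]==' ' and myString[i] in digits:
--             resStr+="ag"+myString[i]
--         else:resStr+=myString[i]
--     return resStr
-- ===== SOURCE B (Python) =====
-- def numToAgnum(myString):
--     # split/join strategy: every run between spaces that starts with a digit
--     # (other than the very first run) gets an "ag" prefix
--     parts = myString[:-1].split(' ')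
--     fixed = parts[:1] + [('ag' + p if p[:1].isdigit() else p) for p in parts[1:]]
--     return ' '.join(fixed)[1:]
-- ===== Notes on version B (the rewrite author's own statement) =====
-- stated objective: idiomatic
-- what changed: Replaces A's index-by-index character scan with accumulator by a split-on-space, prefix-each-digit-starting-chunk, rejoin pass over the sliced string.
import Mathlib
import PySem

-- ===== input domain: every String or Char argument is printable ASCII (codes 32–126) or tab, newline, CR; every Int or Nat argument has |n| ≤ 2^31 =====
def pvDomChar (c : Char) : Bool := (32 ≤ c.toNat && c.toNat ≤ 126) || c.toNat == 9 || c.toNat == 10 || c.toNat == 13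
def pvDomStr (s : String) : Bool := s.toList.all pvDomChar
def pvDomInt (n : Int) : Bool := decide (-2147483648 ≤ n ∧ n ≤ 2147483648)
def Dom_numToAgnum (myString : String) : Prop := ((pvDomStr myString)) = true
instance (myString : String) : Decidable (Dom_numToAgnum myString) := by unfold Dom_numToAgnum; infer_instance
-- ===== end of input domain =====

-- B replaces A's index-by-index scan with a split-on-space / prefix / rejoin pass (idiomatic, same cost).

-- ===== PORT A =====
-- indices i-1 and i are always in range (1 ≤ i ≤ len-2), so pyGetD's default is never used
def numToAgnum (myString : String) : String :=
  let digits : List Char := ['0','1','2','3','4','5','6','7','8','9']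
  let s := myString.toList
  String.ofList <|
    (PySem.List.pyRange 1 (PySem.Chars.len s - 1) 1).foldl
      (fun resStr i =>
        if PySem.List.pyGetD s (i-1) ' ' == ' ' && digits.contains (PySem.List.pyGetD s i ' ')
        then resStr ++ ('a' :: 'g' :: [PySem.List.pyGetD s i ' '])
        else resStr ++ [PySem.List.pyGetD s i ' ']) []

-- ===== PORT B =====
-- 'ag' + p if p[:1].isdigit() else p
def pvAgFix (p : List Char) : List Char :=
  if PySem.Chars.strIsdigit (PySem.List.slice p none (some 1)) then 'a' :: 'g' :: p else p

def numToAgnum_alt (myString : String) : String :=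
  let core := PySem.List.slice myString.toList none (some (-1))
  let parts := PySem.Chars.splitOn core [' ']
  let fixed := PySem.List.slice parts none (some 1)
               ++ (PySem.List.slice parts (some 1) none).map pvAgFix
  String.ofList (PySem.List.slice (PySem.Chars.join [' '] fixed) (some 1) none)

-- ===== PRECONDITION & SPEC =====
def Spec_numToAgnum (myString : String) (out : String) : Prop := out = numToAgnum_alt myString
instance (myString : String) (out : String) : Decidable (Spec_numToAgnum myString out) := by unfold Spec_numToAgnum; infer_instance

-- ===== CLAIM (what is proved, stated in full; the proofs are below) =====
def Claim_equal_numToAgnum : Prop := ∀ (myString : String), Dom_numToAgnum myString → Spec_numToAgnum myString (numToAgnum myString)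

-- ===== LEMMAS AND PROOFS =====

-- proof-side model: insert "ag" before each digit whose predecessor is a space
def pvIns (prev : Char) : List Char → List Char
  | [] => []
  | c :: t => (if prev == ' ' && PySem.Chars.isdigit c then ['a', 'g', c] else [c]) ++ pvIns c t

-- proof-side model of split(' ') with the current chunk accumulated in order
def pvSplit (pre : List Char) : List Char → List (List Char)
  | [] => [pre]
  | c :: t => if c == ' ' then pre :: pvSplit [] t else pvSplit (pre ++ [c]) t

theorem pv_digit_eq (c : Char) :
    (['0','1','2','3','4','5','6','7','8','9'] : List Char).contains c = PySem.Chars.isdigit c := by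
  simp only [List.contains_eq_mem, List.mem_cons, List.not_mem_nil, or_false, PySem.Chars.isdigit]
  rcases c with ⟨v, hv⟩
  simp only [Char.le_def, Char.ext_iff]
  rcases v with ⟨n, hn⟩
  simp only [UInt32.le_iff_toNat_le, UInt32.ext_iff, UInt32.toNat]
  rw [← Bool.decide_and, decide_eq_decide]
  simp only [show '0'.val.toBitVec.toNat = 48 from rfl, show '1'.val.toBitVec.toNat = 49 from rfl,
    show '2'.val.toBitVec.toNat = 50 from rfl, show '3'.val.toBitVec.toNat = 51 from rfl,
    show '4'.val.toBitVec.toNat = 52 from rfl, show '5'.val.toBitVec.toNat = 53 from rfl,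
    show '6'.val.toBitVec.toNat = 54 from rfl, show '7'.val.toBitVec.toNat = 55 from rfl,
    show '8'.val.toBitVec.toNat = 56 from rfl, show '9'.val.toBitVec.toNat = 57 from rfl]
  omega

theorem pvAgFix_nil : pvAgFix [] = [] := by decide

theorem pvAgFix_append (pre : List Char) (d : Char) (h : pre ≠ []) :
    pvAgFix (pre ++ [d]) = pvAgFix pre ++ [d] := by
  unfold pvAgFix
  rw [PySem.List.slice_to _ (by norm_num), PySem.List.slice_to _ (by norm_num)]
  cases pre with
  | nil => exact absurd rfl h
  | cons a t => simp [List.take_append]; split <;> simp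

theorem pvAgFix_single (d : Char) :
    pvAgFix [d] = if PySem.Chars.isdigit d then ['a','g',d] else [d] := by
  unfold pvAgFix
  rw [PySem.List.slice_to _ (by norm_num)]
  simp [PySem.Chars.strIsdigit]

theorem pvSplit_ne_nil (t pre : List Char) : pvSplit pre t ≠ [] := by
  induction t generalizing pre with
  | nil => simp [pvSplit]
  | cons c t ih => by_cases h : c = ' ' <;> simp [pvSplit, h, ih]

theorem pv_join_cons (p : List Char) (ps : List (List Char)) (h : ps ≠ []) :
    PySem.Chars.join [' '] (p :: ps) = p ++ ' ' :: PySem.Chars.join [' '] ps := by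
  cases ps with
  | nil => exact absurd rfl h
  | cons q qs => rw [PySem.Chars.join_cons_cons]; simp

theorem pv_go_eq (fuel : Nat) (l cur : List Char) (acc : List (List Char)) (h : l.length < fuel) :
    PySem.Chars.splitOn.go [' '] fuel l cur acc = acc.reverse ++ pvSplit cur.reverse l := by
  induction fuel generalizing l cur acc with
  | zero => omega
  | succ fuel ih =>
    cases l with
    | nil => simp [PySem.Chars.splitOn.go, pvSplit]
    | cons c rest =>
      rw [PySem.Chars.splitOn.go]
      by_cases hc : c = ' '
      · subst hc
        rw [if_pos (by simp [List.isPrefixOf])]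
        simp only [List.length_cons] at h
        rw [ih _ _ _ (by simpa using Nat.lt_of_succ_lt_succ h)]
        simp [pvSplit]
      · rw [if_neg (by simp [List.isPrefixOf]; exact fun e => hc e.symm)]
        simp only [List.length_cons] at h
        rw [ih _ _ _ (Nat.lt_of_succ_lt_succ h)]
        simp [pvSplit, hc]

theorem pv_splitOn_eq (l : List Char) : PySem.Chars.splitOn l [' '] = pvSplit [] l := by
  rw [PySem.Chars.splitOn, pv_go_eq _ _ _ _ (by omega)]
  simp

theorem pv_M2 (t : List Char) (pre : List Char) (c : Char)
    (h : (pre = [] ∧ c = ' ') ∨ (pre ≠ [] ∧ pre.getLast? = some c ∧ c ≠ ' ')) :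
    PySem.Chars.join [' '] ((pvSplit pre t).map pvAgFix) = pvAgFix pre ++ pvIns c t := by
  induction t generalizing pre c with
  | nil => simp [pvSplit, pvIns, PySem.Chars.join_singleton]
  | cons d t ih =>
    by_cases hd : d = ' '
    · subst hd
      rw [show pvSplit pre (' ' :: t) = pre :: pvSplit [] t from by simp [pvSplit]]
      rw [List.map_cons, pv_join_cons _ _ (by simp [pvSplit_ne_nil])]
      rw [ih [] ' ' (Or.inl ⟨rfl, rfl⟩), pvAgFix_nil]
      rcases h with ⟨rfl, rfl⟩ | ⟨hpre, hlast, hc⟩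
      · simp [pvIns, pvAgFix_nil, PySem.Chars.isdigit]
      · simp [pvIns, show (c == ' ') = false from by simp [hc]]
    · rw [show pvSplit pre (d :: t) = pvSplit (pre ++ [d]) t from by simp [pvSplit, hd]]
      rcases h with ⟨rfl, rfl⟩ | ⟨hpre, hlast, hc⟩
      · rw [show ([] ++ [d] : List Char) = [d] from rfl, ih [d] d (Or.inr ⟨by simp, by simp, hd⟩)]
        simp only [List.nil_append, pvAgFix_nil, pvAgFix_single, pvIns]
        simp [PySem.Chars.isdigit]
      · rw [ih (pre ++ [d]) d (Or.inr ⟨by simp, by simp, hd⟩)]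
        rw [pvAgFix_append _ _ hpre]
        simp [pvIns, show (c == ' ') = false from by simp [hc]]

theorem pv_M3 (t : List Char) (pre : List Char) (c : Char)
    (hpre : pre ≠ []) (hlast : pre.getLast? = some c) (hc : c ≠ ' ') :
    PySem.Chars.join [' ']
      ((pvSplit pre t).take 1 ++ ((pvSplit pre t).drop 1).map pvAgFix) = pre ++ pvIns c t := by
  induction t generalizing pre c with
  | nil => simp [pvSplit, pvIns, PySem.Chars.join_singleton]
  | cons d t ih =>
    by_cases hd : d = ' '
    · subst hd
      rw [show pvSplit pre (' ' :: t) = pre :: pvSplit [] t from by simp [pvSplit]]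
      simp only [List.take_succ_cons, List.take_zero, List.drop_succ_cons, List.drop_zero]
      rw [show ([pre] : List (List Char)) ++ (pvSplit [] t).map pvAgFix = pre :: (pvSplit [] t).map pvAgFix from rfl]
      rw [pv_join_cons _ _ (by simp [pvSplit_ne_nil])]
      rw [pv_M2 t [] ' ' (Or.inl ⟨rfl, rfl⟩), pvAgFix_nil]
      simp [pvIns, show (c == ' ') = false from by simp [hc]]
    · rw [show pvSplit pre (d :: t) = pvSplit (pre ++ [d]) t from by simp [pvSplit, hd]]
      rw [ih (pre ++ [d]) d (by simp) (by simp) hd]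
      simp [pvIns, show (c == ' ') = false from by simp [hc]]

theorem pv_range_nil (a b : Int) (h : b ≤ a) : PySem.List.pyRange a b 1 = [] := by
  simp only [PySem.List.pyRange]
  rw [if_neg (by norm_num)]
  simp [show ¬ a < b from by omega]

theorem pv_FA (s : List Char) (k : Nat) (hk : 1 ≤ k) (c : Char) (hc : s[k-1]? = some c)
    (acc : List Char) :
    (PySem.List.pyRange k (PySem.Chars.len s - 1) 1).foldl
      (fun resStr i =>
        if PySem.List.pyGetD s (i-1) ' ' == ' ' &&
           (['0','1','2','3','4','5','6','7','8','9'] : List Char).contains (PySem.List.pyGetD s i ' ')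
        then resStr ++ ('a' :: 'g' :: [PySem.List.pyGetD s i ' '])
        else resStr ++ [PySem.List.pyGetD s i ' ']) acc
    = acc ++ pvIns c ((s.drop k).dropLast) := by
  have hlen : PySem.Chars.len s = (s.length : Int) := by simp [PySem.Chars.len_eq]
  by_cases hlt : k + 1 < s.length
  case neg =>
    rw [hlen, pv_range_nil _ _ (by omega)]
    have : (s.drop k).dropLast = [] := by
      have hl : (s.drop k).dropLast.length = 0 := by simp; omega
      exact List.eq_nil_of_length_eq_zero hl
    simp [this, pvIns]
  case pos =>
    have hks : k < s.length := by omega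
    obtain ⟨d, hd⟩ : ∃ d, s[k]? = some d := ⟨s[k], List.getElem?_eq_getElem hks⟩
    rw [hlen, PySem.List.pyRange_one_cons (by omega), List.foldl_cons]
    have e1 : ((k : Int) - 1) = ((k-1 : Nat) : Int) := by omega
    have e2 : ((k : Int) + 1) = ((k+1 : Nat) : Int) := by omega
    have hstep :
        (if PySem.List.pyGetD s ((k:Int)-1) ' ' == ' ' &&
           (['0','1','2','3','4','5','6','7','8','9'] : List Char).contains (PySem.List.pyGetD s (k:Int) ' ')
         then acc ++ ('a' :: 'g' :: [PySem.List.pyGetD s (k:Int) ' '])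
         else acc ++ [PySem.List.pyGetD s (k:Int) ' '])
        = acc ++ (if c == ' ' && PySem.Chars.isdigit d then ['a','g',d] else [d]) := by
      rw [e1]
      simp only [PySem.List.pyGetD_natCast]
      rw [show s.getD (k-1) ' ' = c from by simp [List.getD, hc],
          show s.getD k ' ' = d from by simp [List.getD, hd], pv_digit_eq]
      split <;> rfl
    rw [hstep]
    have hrec := pv_FA s (k+1) (by omega) d (by simpa using hd) (acc ++ (if c == ' ' && PySem.Chars.isdigit d then ['a','g',d] else [d]))
    rw [hlen] at hrec
    rw [e2, hrec]
    have hdrop : s.drop k = d :: s.drop (k+1) := by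
      rw [List.getElem?_eq_some_iff] at hd
      obtain ⟨hlt', rfl⟩ := hd
      exact List.drop_eq_getElem_cons hks
    have htail : (s.drop k).dropLast = d :: (s.drop (k+1)).dropLast := by
      rw [hdrop, List.dropLast_cons_of_ne_nil]
      intro hnil
      have := congrArg List.length hnil
      simp at this; omega
    rw [htail]
    simp [pvIns]
termination_by s.length - k
decreasing_by omega

theorem pv_B_eq (s : List Char) :
    PySem.List.slice
        (PySem.Chars.join [' ']
          (PySem.List.slice (PySem.Chars.splitOn (PySem.List.slice s none (some (-1))) [' ']) none (some 1)
           ++ (PySem.List.slice (PySem.Chars.splitOn (PySem.List.slice s none (some (-1))) [' ']) (some 1) none).map pvAgFix))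
        (some 1) none
    = match s with
      | [] => []
      | c0 :: t => pvIns c0 t.dropLast := by
  rw [PySem.List.slice_to_neg_one, pv_splitOn_eq]
  have htake : ∀ (ps : List (List Char)), PySem.List.slice ps none (some 1) = ps.take 1 := by
    intro ps; rw [PySem.List.slice_to _ (by norm_num)]; rfl
  have hdrop : ∀ (ps : List (List Char)), PySem.List.slice ps (some 1) none = ps.drop 1 := by
    intro ps; rw [PySem.List.slice_from_one]; exact List.drop_one.symm ▸ rfl
  rw [htake, hdrop, PySem.List.slice_from_one]
  cases s with
  | nil => simp [pvSplit, PySem.Chars.join_singleton]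
  | cons c0 t =>
    cases t with
    | nil => simp [pvSplit, PySem.Chars.join_singleton, pvIns]
    | cons c1 t' =>
      have hcore : (c0 :: c1 :: t').dropLast = c0 :: (c1 :: t').dropLast := by
        rw [List.dropLast_cons_of_ne_nil]; simp
      rw [hcore]
      by_cases h0 : c0 = ' '
      · subst h0
        rw [show pvSplit [] (' ' :: (c1 :: t').dropLast) = [] :: pvSplit [] (c1 :: t').dropLast from by simp [pvSplit]]
        simp only [List.take_succ_cons, List.take_zero, List.drop_succ_cons, List.drop_zero]
        rw [show ([([] : List Char)] : List (List Char)) ++ (pvSplit [] (c1 :: t').dropLast).map pvAgFix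
              = ([] : List Char) :: (pvSplit [] (c1 :: t').dropLast).map pvAgFix from rfl]
        rw [pv_join_cons _ _ (by simp [pvSplit_ne_nil])]
        rw [pv_M2 _ [] ' ' (Or.inl ⟨rfl, rfl⟩), pvAgFix_nil]
        simp [List.tail]
      · rw [show pvSplit [] (c0 :: (c1 :: t').dropLast) = pvSplit [c0] (c1 :: t').dropLast from by simp [pvSplit, h0]]
        rw [pv_M3 _ [c0] c0 (by simp) (by simp) h0]
        simp [List.tail]

theorem pv_key (s : List Char) :
    (PySem.List.pyRange 1 (PySem.Chars.len s - 1) 1).foldl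
      (fun resStr i =>
        if PySem.List.pyGetD s (i-1) ' ' == ' ' &&
           (['0','1','2','3','4','5','6','7','8','9'] : List Char).contains (PySem.List.pyGetD s i ' ')
        then resStr ++ ('a' :: 'g' :: [PySem.List.pyGetD s i ' '])
        else resStr ++ [PySem.List.pyGetD s i ' ']) []
    = PySem.List.slice
        (PySem.Chars.join [' ']
          (PySem.List.slice (PySem.Chars.splitOn (PySem.List.slice s none (some (-1))) [' ']) none (some 1)
           ++ (PySem.List.slice (PySem.Chars.splitOn (PySem.List.slice s none (some (-1))) [' ']) (some 1) none).map pvAgFix))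
        (some 1) none := by
  rw [pv_B_eq]
  cases s with
  | nil =>
    have : PySem.Chars.len ([] : List Char) - 1 = (-1 : Int) := by simp [PySem.Chars.len_eq]
    rw [this, pv_range_nil _ _ (by omega)]
    rfl
  | cons c0 t =>
    have := pv_FA (c0 :: t) 1 (by omega) c0 (by simp) []
    simpa using this

-- ===== VERDICT (by name: the statement is the Claim_ definition above) =====
theorem numToAgnum_spec : Claim_equal_numToAgnum := by
  intro myString _
  unfold Spec_numToAgnum numToAgnum numToAgnum_alt
  exact congrArg String.ofList (pv_key myString.toList)
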